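-- pv_equiv track=rewrite | github.com/allexrosca/Facultate---teme-proiecte | python/nrCuvinte.py | cuvinte
-- ===== SOURCE A (Python) =====
-- def cuvinte(str):
--     count = 0
--     str = str.replace("?", " ")
--     str = str.replace(".", " ")
--     str = str.replace("!", " ")
--     str = str.replace(",", " ")
--     str = str.replace(";", " ")
--     for i in str.split(" "):
--         count = count + 1
--     return count
-- ===== SOURCE B (Python) =====
-- def cuvinte(str):
--     count = 1
--     for c in str:
--         if c in " ?.!,;":
--             count = count + 1
--     return count
-- ===== Notes on version B (the rewrite author's own statement) =====
-- stated objective: simpler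
-- what changed: B drops the five replace passes and the split pass entirely: it makes a single pass over the characters, counting those that belong to the six-character delimiter set, and returns that count plus one, since splitting yields one piece per delimiter occurrence plus one.
import Mathlib
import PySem

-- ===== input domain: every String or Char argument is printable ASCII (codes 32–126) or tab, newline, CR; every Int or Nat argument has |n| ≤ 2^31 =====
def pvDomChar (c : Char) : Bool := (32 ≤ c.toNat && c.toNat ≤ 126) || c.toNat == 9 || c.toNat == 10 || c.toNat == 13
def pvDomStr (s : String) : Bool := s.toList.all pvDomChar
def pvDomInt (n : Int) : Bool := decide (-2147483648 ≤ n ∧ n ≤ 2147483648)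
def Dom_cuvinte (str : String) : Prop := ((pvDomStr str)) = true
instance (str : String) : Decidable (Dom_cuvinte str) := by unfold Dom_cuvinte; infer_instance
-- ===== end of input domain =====

-- B replaces A's five replace passes plus a split pass by one counting pass:
-- split(' ') yields one piece per single-space delimiter plus one.

-- ===== PORT A =====
def cuvinte (str : String) : Int :=
  let count : Int := 0
  let str := PySem.Str.replace str "?" " "
  let str := PySem.Str.replace str "." " "
  let str := PySem.Str.replace str "!" " "
  let str := PySem.Str.replace str "," " "
  let str := PySem.Str.replace str ";" " "
  -- for i in str.split(" "): count = count + 1   (sep " " is nonempty, so split = Chars.splitOn)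
  (PySem.Chars.splitOn str.toList " ".toList).foldl (fun count _ => count + 1) count

-- ===== PORT B =====
def cuvinte_alt (str : String) : Int :=
  let count : Int := 1
  -- for c in str: if c in " ?.!,;": count = count + 1   ('c in s' on a single char = membership)
  str.toList.foldl (fun count c => if (" ?.!,;".toList.contains c) = true then count + 1 else count) count

-- ===== PRECONDITION & SPEC =====
def Spec_cuvinte (str : String) (out : Int) : Prop := out = cuvinte_alt str
instance (str : String) (out : Int) : Decidable (Spec_cuvinte str out) := by unfold Spec_cuvinte; infer_instance

-- ===== CLAIM (what is proved, stated in full; the proofs are below) =====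
def Claim_equal_cuvinte : Prop := ∀ (str : String), Dom_cuvinte str → Spec_cuvinte str (cuvinte str)

-- ===== LEMMAS AND PROOFS =====

-- replacing a single character by a single space is a pointwise map
theorem replace_go_single (o : Char) (l acc : List Char) (fuel : Nat) (h : l.length ≤ fuel) :
    PySem.Chars.replace.go [o] [' '] fuel l acc
      = acc.reverse ++ l.map (fun c => if c = o then ' ' else c) := by
  induction l generalizing fuel acc with
  | nil => cases fuel <;> simp [PySem.Chars.replace.go]
  | cons c t ih =>
    cases fuel with
    | zero => simp at h
    | succ fuel =>
      simp only [List.length_cons, Nat.add_le_add_iff_right] at h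
      simp only [PySem.Chars.replace.go]
      by_cases hc : c = o
      · subst hc
        rw [if_pos (by simp [List.isPrefixOf])]
        simp only [List.length_cons, List.length_nil, List.drop_succ_cons, List.drop_zero]
        rw [ih _ _ h]
        simp
      · rw [if_neg (by simp [List.isPrefixOf]; intro hco; exact hc hco.symm)]
        rw [ih _ _ h]
        simp [hc]

theorem replace_single (cs : List Char) (o : Char) :
    PySem.Chars.replace cs [o] [' '] = cs.map (fun c => if c = o then ' ' else c) := by
  simp [PySem.Chars.replace, replace_go_single o cs [] cs.length le_rfl]

-- splitting on a single space: number of pieces = number of spaces + 1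
theorem splitOn_go_len (l cur : List Char) (acc : List (List Char)) (fuel : Nat)
    (h : l.length < fuel) :
    (PySem.Chars.splitOn.go [' '] fuel l cur acc).length
      = acc.length + 1 + l.count ' ' := by
  induction l generalizing fuel cur acc with
  | nil =>
    cases fuel with
    | zero => simp at h
    | succ fuel => simp [PySem.Chars.splitOn.go]
  | cons c t ih =>
    cases fuel with
    | zero => simp at h
    | succ fuel =>
      simp only [List.length_cons, Nat.add_lt_add_iff_right] at h
      simp only [PySem.Chars.splitOn.go]
      by_cases hc : c = ' '
      · subst hc
        rw [if_pos (by simp [List.isPrefixOf])]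
        simp only [List.length_cons, List.length_nil, List.drop_succ_cons, List.drop_zero]
        rw [ih _ _ _ h]
        simp
        omega
      · rw [if_neg (by simp [List.isPrefixOf]; intro hco; exact hc hco.symm)]
        rw [ih _ _ _ h]
        simp [hc]

theorem splitOn_len (cs : List Char) :
    (PySem.Chars.splitOn cs [' ']).length = cs.count ' ' + 1 := by
  simp [PySem.Chars.splitOn, splitOn_go_len cs [] [] (cs.length + 1) (by omega)]
  omega

theorem foldl_count_plus_one {α : Type} (l : List α) (a : Int) :
    l.foldl (fun c _ => c + 1) a = a + l.length := by
  induction l generalizing a with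
  | nil => simp
  | cons x t ih => simp [List.foldl, ih]; ring

theorem foldl_alt (l : List Char) (a : Int) :
    l.foldl (fun count c => if (" ?.!,;".toList.contains c) = true then count + 1 else count) a
      = a + l.countP (fun c => " ?.!,;".toList.contains c) := by
  induction l generalizing a with
  | nil => simp
  | cons c t ih =>
    simp only [List.foldl_cons, List.countP_cons, ih]
    by_cases h : (" ?.!,;".toList.contains c) = true
    · rw [if_pos h, if_pos h]; push_cast; ring
    · rw [if_neg h, if_neg h]; push_cast; ring

-- the composite of the five single-char replacements maps a char to ' ' iff it is a delimiter
theorem key_pred (c : Char) :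
    ((((((fun x => x == ' ') ∘ fun c => if c = ';' then ' ' else c) ∘
          fun c => if c = ',' then ' ' else c) ∘
          fun c => if c = '!' then ' ' else c) ∘
          fun c => if c = '.' then ' ' else c) ∘
          fun c => if c = '?' then ' ' else c) c
      = (" ?.!,;".toList.contains c) := by
  simp only [Function.comp]
  by_cases h1 : c = '?' <;> by_cases h2 : c = '.' <;> by_cases h3 : c = '!' <;>
    by_cases h4 : c = ',' <;> by_cases h5 : c = ';' <;> by_cases h6 : c = ' ' <;>
    simp_all

-- ===== VERDICT (by name: the statement is the Claim_ definition above) =====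
theorem cuvinte_spec : Claim_equal_cuvinte := by
  intro str _
  unfold Spec_cuvinte cuvinte cuvinte_alt
  simp only [PySem.Str.toList_replace]
  rw [show ("?" : String).toList = ['?'] from rfl, show ("." : String).toList = ['.'] from rfl,
      show ("!" : String).toList = ['!'] from rfl, show ("," : String).toList = [','] from rfl,
      show (";" : String).toList = [';'] from rfl, show (" " : String).toList = [' '] from rfl]
  rw [replace_single, replace_single, replace_single, replace_single, replace_single]
  rw [foldl_count_plus_one, splitOn_len, foldl_alt]
  simp only [List.count_eq_countP, List.countP_map]
  rw [List.countP_congr (fun c _ => (by rw [key_pred c]))]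
  push_cast
  ring
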